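-- pv_equiv track=rewrite | github.com/SegniDessalegn/competitive-programming | 2640-find-the-score-of-all-prefixes-of-an-array/2640-find-the-score-of-all-prefixes-of-an-array.py | findPrefixScore
-- ===== SOURCE A (Python) =====
-- from typing import List
--
-- def findPrefixScore(nums: List[int]) -> List[int]:
--     curr_max = nums[0]
--     ans = []
--     for i in range(len(nums)):
--         curr_max = max(curr_max, nums[i])
--         ans.append(nums[i] + curr_max)
--
--     for i in range(1, len(ans)):
--         ans[i] += ans[i - 1]
--
--     return ans
-- ===== SOURCE B (Python) =====
-- from typing import List
--
-- def findPrefixScore(nums: List[int]) -> List[int]: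
--     # Segment decomposition: split nums into maximal runs headed by each new
--     # strict record maximum; within a run the max contribution is m*(j+1),
--     # computed by multiplication, so no running max or prefix-sum pass exists.
--     ans = []
--     s = 0      # running sum of the elements already emitted
--     base = 0   # max-contributions of completed segments
--     i = 0
--     n = len(nums)
--     while i < n:
--         m = nums[i]               # record value heading this segment
--         k = i + 1
--         while k < n and nums[k] <= m:
--             k += 1                # segment is nums[i:k]
--         for j in range(i, k):
--             s += nums[j]
--             ans.append(s + base + m * (j - i + 1))
--         base += m * (k - i)
--         i = k
--     return ans
-- ===== Notes on version B (the rewrite author's own statement) =====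
-- stated objective: alternative
-- what changed: B decomposes the input into maximal segments headed by each new strict record maximum and, per segment, computes the max contribution arithmetically as m*(position+1), so it maintains neither a running max over the whole array nor A's separate prefix-sum sweep.
import Mathlib
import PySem

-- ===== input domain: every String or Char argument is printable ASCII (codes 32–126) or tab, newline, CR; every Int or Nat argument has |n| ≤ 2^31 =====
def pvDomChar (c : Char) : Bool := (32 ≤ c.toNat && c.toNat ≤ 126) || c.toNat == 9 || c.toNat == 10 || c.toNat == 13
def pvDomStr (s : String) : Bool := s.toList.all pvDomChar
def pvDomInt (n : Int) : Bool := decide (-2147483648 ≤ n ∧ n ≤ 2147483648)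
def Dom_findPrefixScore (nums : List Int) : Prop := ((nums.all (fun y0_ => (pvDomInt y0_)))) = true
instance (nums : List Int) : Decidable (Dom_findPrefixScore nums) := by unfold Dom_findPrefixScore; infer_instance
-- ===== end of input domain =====

-- B recomputes the scores by splitting nums into maximal segments headed by each strict record maximum, obtaining the max contribution per segment as m*(position+1) by multiplication (objective: alternative); Pre_ excludes [] where A raises IndexError.


-- ===== PORT A =====
-- first loop: curr_max = max(curr_max, nums[i]); ans.append(nums[i] + curr_max)
def pvPass1 (curr_max : Int) : List Int → List Int
  | [] => []
  | x :: xs => (x + max curr_max x) :: pvPass1 (max curr_max x) xs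

-- second loop: for i in range(1, len(ans)): ans[i] += ans[i-1]
def pvPass2 (prev : Int) : List Int → List Int
  | [] => []
  | x :: xs => (prev + x) :: pvPass2 (prev + x) xs

def findPrefixScore (nums : List Int) : List Int :=
  match nums with
  | [] => []        -- Python raises IndexError at nums[0]; excluded by Pre_
  | h :: _ =>
    match pvPass1 h nums with
    | [] => []
    | y :: ys => y :: pvPass2 y ys

-- ===== PORT B =====
-- inner while loop 'while k < n and nums[k] <= m': splits the rest into the
-- current segment (elements ≤ m) and the remainder (headed by the next record)
def pvSeg (m : Int) : List Int → List Int × List Int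
  | [] => ([], [])
  | x :: xs => if x ≤ m then
      let p := pvSeg m xs
      (x :: p.1, p.2)
    else ([], x :: xs)

-- for j in range(i, k): s += nums[j]; ans.append(s + base + m * (j - i + 1))
def pvEmit (m base : Int) : Int → Int → List Int → List Int
  | _, _, [] => []
  | s, j, x :: xs => (s + x + base + m * (j + 1)) :: pvEmit m base (s + x) (j + 1) xs

-- outer while loop over the remaining list, state (s, base); the first Nat
-- argument is fuel bounding the number of iterations (the remaining length)
def pvRun : Nat → Int → Int → List Int → List Int
  | 0, _, _, _ => []
  | _ + 1, _, _, [] => []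
  | fuel + 1, s, base, x :: xs =>
    let p := pvSeg x xs
    pvEmit x base s 0 (x :: p.1) ++
      pvRun fuel (s + x + p.1.sum) (base + x * (1 + (p.1.length : Int))) p.2

def findPrefixScore_alt (nums : List Int) : List Int := pvRun nums.length 0 0 nums

-- ===== PRECONDITION & SPEC =====
-- A raises IndexError on the empty list (nums[0]); those inputs are excluded.
def Pre_findPrefixScore (nums : List Int) : Prop := nums ≠ []
instance (nums : List Int) : Decidable (Pre_findPrefixScore nums) := by unfold Pre_findPrefixScore; infer_instance
def pvWitness_findPrefixScore : List Int := [2, 3, 7, 5, 10]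

def Spec_findPrefixScore (nums : List Int) (out : List Int) : Prop := out = findPrefixScore_alt nums
instance (nums : List Int) (out : List Int) : Decidable (Spec_findPrefixScore nums out) := by unfold Spec_findPrefixScore; infer_instance

-- ===== CLAIM (what is proved, stated in full; the proofs are below) =====
def Claim_equal_findPrefixScore : Prop := ∀ (nums : List Int), Dom_findPrefixScore nums → Pre_findPrefixScore nums → Spec_findPrefixScore nums (findPrefixScore nums)

-- ===== LEMMAS AND PROOFS =====
-- A's two passes fuse into a single scan with a running (max, total) state.
def pvFused (m t : Int) : List Int → List Int
  | [] => []
  | x :: xs => (t + x + max m x) :: pvFused (max m x) (t + x + max m x) xs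

theorem pvPass2_pass1_eq_fused (xs : List Int) (m t : Int) :
    pvPass2 t (pvPass1 m xs) = pvFused m t xs := by
  induction xs generalizing m t with
  | nil => rfl
  | cons x xs ih =>
    simp only [pvPass1, pvPass2, pvFused]
    rw [show t + (x + max m x) = t + x + max m x by ring, ih]

theorem pvSeg_decomp (m : Int) (xs : List Int) :
    (pvSeg m xs).1 ++ (pvSeg m xs).2 = xs := by
  induction xs with
  | nil => rfl
  | cons x xs ih =>
    simp only [pvSeg]
    split
    · simpa using ih
    · simp

theorem pvSeg_fst_le (m : Int) (xs : List Int) :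
    ∀ y ∈ (pvSeg m xs).1, y ≤ m := by
  induction xs with
  | nil => simp [pvSeg]
  | cons x xs ih =>
    simp only [pvSeg]
    split
    · intro y hy
      rcases List.mem_cons.mp hy with h | h
      · omega
      · exact ih y h
    · simp

theorem pvSeg_snd_head (m : Int) (xs : List Int) (z : Int) (l : List Int)
    (h : (pvSeg m xs).2 = z :: l) : m < z := by
  induction xs generalizing z l with
  | nil => simp [pvSeg] at h
  | cons x xs ih =>
    simp only [pvSeg] at h
    by_cases hx : x ≤ m
    · simp only [hx, if_pos] at h
      exact ih z l h
    · simp only [hx, if_neg, not_false_iff] at h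
      cases h
      omega

-- within a segment of elements ≤ m, the fused scan equals the emitted segment
theorem pvEmit_eq_fused (m : Int) (seg : List Int) (hseg : ∀ y ∈ seg, y ≤ m) :
    ∀ (tail : List Int) (s base j : Int),
    pvFused m (s + base + m * j) (seg ++ tail) =
      pvEmit m base s j seg ++
        pvFused m (s + seg.sum + base + m * (j + (seg.length : Int))) tail := by
  induction seg with
  | nil => intro tail s base j; simp [pvEmit]
  | cons y ys ih =>
    intro tail s base j
    have hy : y ≤ m := hseg y (List.mem_cons_self ..)
    have hys : ∀ z ∈ ys, z ≤ m := fun z hz => hseg z (List.mem_cons_of_mem _ hz)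
    simp only [List.cons_append, pvFused, pvEmit, max_eq_left hy]
    rw [show s + base + m * j + y + m = (s + y) + base + m * (j + 1) by ring, ih hys]
    simp only [List.sum_cons, List.length_cons]
    have harg : s + y + ys.sum + base + m * (j + 1 + (ys.length : Int)) =
        s + (y + ys.sum) + base + m * (j + ((ys.length : Int) + 1)) := by ring
    rw [harg]
    norm_cast

theorem pvFused_head_le (m x t : Int) (l : List Int) (h : m ≤ x) :
    pvFused m t (x :: l) = pvFused x t (x :: l) := by
  simp [pvFused, max_eq_right h, max_self]

theorem pvSeg_snd_length (m : Int) (xs : List Int) : (pvSeg m xs).2.length ≤ xs.length := by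
  induction xs with
  | nil => simp [pvSeg]
  | cons x xs ih =>
    simp only [pvSeg]
    split
    · simpa using Nat.le_succ_of_le ih
    · simp

theorem pvRun_nil (fuel : Nat) (s base : Int) : pvRun fuel s base [] = [] := by
  cases fuel <;> rfl

theorem pvRun_eq_fused (fuel : Nat) :
    ∀ (xs : List Int), xs.length < fuel → ∀ (x s base m : Int), m ≤ x →
      pvRun fuel s base (x :: xs) = pvFused m (s + base) (x :: xs) := by
  induction fuel with
  | zero => intro xs h; omega
  | succ n ih =>
    intro xs hlen x s base m hm
    rw [pvFused_head_le _ _ _ _ hm]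
    rw [pvRun]
    have hx : ∀ y ∈ x :: (pvSeg x xs).1, y ≤ x := by
      intro y hy
      rcases List.mem_cons.mp hy with h | h
      · omega
      · exact pvSeg_fst_le x xs y h
    have hdec := pvSeg_decomp x xs
    have := pvEmit_eq_fused x (x :: (pvSeg x xs).1) hx (pvSeg x xs).2 s base 0
    rw [show (x :: (pvSeg x xs).1) ++ (pvSeg x xs).2 = x :: xs by
          simpa using hdec] at this
    rw [show s + base = s + base + x * 0 by ring, this]
    congr 1
    cases htl : (pvSeg x xs).2 with
    | nil => simp [pvRun_nil, pvFused]
    | cons z l =>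
      have hz : x < z := pvSeg_snd_head x xs z l htl
      have hlength : l.length < n := by
        have h1 := pvSeg_snd_length x xs
        rw [htl] at h1
        simp at h1
        omega
      rw [ih l hlength z _ _ x (le_of_lt hz)]
      congr 1
      simp only [List.sum_cons, List.length_cons]
      push_cast
      ring

-- ===== VERDICT (by name: the statement is the Claim_ definition above) =====
theorem findPrefixScore_spec : Claim_equal_findPrefixScore := by
  intro nums _ hpre
  unfold Spec_findPrefixScore findPrefixScore findPrefixScore_alt
  cases nums with
  | nil => exact absurd rfl hpre
  | cons h tl =>
    simp only
    have hA : (match pvPass1 h (h :: tl) with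
        | [] => ([] : List Int)
        | y :: ys => y :: pvPass2 y ys) = pvPass2 0 (pvPass1 h (h :: tl)) := by
      cases hp : pvPass1 h (h :: tl) with
      | nil => rfl
      | cons y ys => simp [pvPass2]
    rw [hA, pvPass2_pass1_eq_fused]
    rw [show (h :: tl).length = tl.length + 1 from rfl,
      pvRun_eq_fused (tl.length + 1) tl (by omega) h 0 0 h le_rfl]
    norm_num
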